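-- pv_equiv track=rewrite | github.com/whyj107/CodeWar | 20221014_Can you count loop's execution.py | count_loop_iterations
-- ===== SOURCE A (Python) =====
-- def count_loop_iterations(arr):
--     result = []
--     acc = 1
--     for n, b in arr:
--         n = n + 2 if b else n + 1
--         result.append(acc * n)
--         acc *= n - 1
--     return result
-- ===== SOURCE B (Python) =====
-- def count_loop_iterations(arr):
--     # Divide and conquer: solve halves independently; the right half's answers,
--     # computed as if it started fresh, are all scaled by the product of (m-1)
--     # over the left half.
--     if not arr:
--         return []
--     if len(arr) == 1:
--         n, b = arr[0]
--         return [n + 2 if b else n + 1]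
--     mid = len(arr) // 2
--     left = count_loop_iterations(arr[:mid])
--     right = count_loop_iterations(arr[mid:])
--     p = 1
--     for n, b in arr[:mid]:
--         p *= (n + 2 if b else n + 1) - 1
--     return left + [p * x for x in right]
-- ===== Notes on version B (the rewrite author's own statement) =====
-- stated objective: alternative
-- what changed: A's single left-to-right loop threading an accumulator is replaced by a divide-and-conquer recursion: each half is solved independently and the right half's answers are rescaled by the product of (m-1) over the left half.
import Mathlib
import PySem

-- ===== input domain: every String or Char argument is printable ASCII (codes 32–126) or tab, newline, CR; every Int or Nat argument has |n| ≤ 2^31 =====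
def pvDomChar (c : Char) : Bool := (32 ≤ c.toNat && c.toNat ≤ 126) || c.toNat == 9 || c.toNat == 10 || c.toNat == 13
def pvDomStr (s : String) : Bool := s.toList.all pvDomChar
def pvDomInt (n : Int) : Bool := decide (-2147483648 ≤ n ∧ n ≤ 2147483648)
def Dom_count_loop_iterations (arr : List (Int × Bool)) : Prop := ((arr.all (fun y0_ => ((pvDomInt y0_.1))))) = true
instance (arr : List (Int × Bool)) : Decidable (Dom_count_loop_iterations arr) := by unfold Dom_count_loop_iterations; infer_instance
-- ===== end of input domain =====

-- B replaces A's single accumulator-threading loop by a divide-and-conquer recursion (solve halves, rescale the right half); alternative algorithm, same result.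


-- ===== PORT A =====
-- fold over arr with state (result, acc), appending acc*n and multiplying acc by n-1, as A's loop does
def count_loop_iterations (arr : List (Int × Bool)) : List Int :=
  (arr.foldl (fun (s : List Int × Int) nb =>
      let n := if nb.2 then nb.1 + 2 else nb.1 + 1
      (s.1 ++ [s.2 * n], s.2 * (n - 1))) ([], 1)).1

-- ===== PORT B =====
-- divide and conquer as in Source B: halves solved independently, right half rescaled by the product of (m-1) over the left half
def count_loop_iterations_alt (arr : List (Int × Bool)) : List Int :=
  match arr with
  | [] => []
  | [nb] => [if nb.2 then nb.1 + 2 else nb.1 + 1]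
  | a :: b :: t =>
      let arr' := a :: b :: t
      let mid := arr'.length / 2
      let left := count_loop_iterations_alt (arr'.take mid)
      let right := count_loop_iterations_alt (arr'.drop mid)
      let p := (arr'.take mid).foldl
        (fun p nb => p * ((if nb.2 then nb.1 + 2 else nb.1 + 1) - 1)) 1
      left ++ right.map (fun x => p * x)
termination_by arr.length
decreasing_by
  · simp; omega
  · simp; omega

-- ===== PRECONDITION & SPEC =====
def Spec_count_loop_iterations (arr : List (Int × Bool)) (out : List Int) : Prop := out = count_loop_iterations_alt arr
instance (arr : List (Int × Bool)) (out : List Int) : Decidable (Spec_count_loop_iterations arr out) := by unfold Spec_count_loop_iterations; infer_instance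

-- ===== CLAIM (what is proved, stated in full; the proofs are below) =====
def Claim_equal_count_loop_iterations : Prop := ∀ (arr : List (Int × Bool)), Dom_count_loop_iterations arr → Spec_count_loop_iterations arr (count_loop_iterations arr)

-- ===== LEMMAS AND PROOFS =====
-- F arr acc: the mathematical recurrence of A's loop (result list only)
def cliF (arr : List (Int × Bool)) (acc : Int) : List Int :=
  match arr with
  | [] => []
  | nb :: t =>
      let n := if nb.2 then nb.1 + 2 else nb.1 + 1
      acc * n :: cliF t (acc * (n - 1))

theorem cliF_fold (arr : List (Int × Bool)) : ∀ (res : List Int) (acc : Int),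
    (arr.foldl (fun (s : List Int × Int) nb =>
      let n := if nb.2 then nb.1 + 2 else nb.1 + 1
      (s.1 ++ [s.2 * n], s.2 * (n - 1))) (res, acc)).1 = res ++ cliF arr acc := by
  induction arr with
  | nil => simp [cliF]
  | cons hd tl ih =>
      intro res acc
      simp only [List.foldl_cons, cliF]
      rw [ih]
      simp

theorem cliF_append (xs ys : List (Int × Bool)) : ∀ (acc : Int),
    cliF (xs ++ ys) acc
      = cliF xs acc ++ cliF ys (xs.foldl
          (fun p nb => p * ((if nb.2 then nb.1 + 2 else nb.1 + 1) - 1)) acc) := by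
  induction xs with
  | nil => intro acc; simp [cliF]
  | cons hd tl ih =>
      intro acc
      simp only [List.cons_append, cliF, List.foldl_cons]
      rw [ih]

theorem cliF_scale (ys : List (Int × Bool)) : ∀ (c : Int),
    cliF ys c = (cliF ys 1).map (fun x => c * x) := by
  induction ys with
  | nil => intro c; simp [cliF]
  | cons hd tl ih =>
      intro c
      simp only [cliF, List.map_cons, List.cons.injEq]
      refine ⟨by ring, ?_⟩
      · rw [ih (c * ((if hd.2 then hd.1 + 2 else hd.1 + 1) - 1)),
            ih (1 * ((if hd.2 then hd.1 + 2 else hd.1 + 1) - 1))]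
        simp only [List.map_map]
        apply List.map_congr_left
        intro x _
        simp only [Function.comp]
        ring

theorem alt_eq_cliF (arr : List (Int × Bool)) :
    count_loop_iterations_alt arr = cliF arr 1 := by
  induction arr using count_loop_iterations_alt.induct with
  | case1 => simp [count_loop_iterations_alt, cliF]
  | case2 nb => simp [count_loop_iterations_alt, cliF]
  | case3 a b t _ _ ihl ihr =>
      rw [count_loop_iterations_alt]
      rw [ihl, ihr, ← cliF_scale, ← cliF_append, List.take_append_drop]

-- ===== VERDICT (by name: the statement is the Claim_ definition above) =====
theorem count_loop_iterations_spec : Claim_equal_count_loop_iterations := by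
  intro arr _
  unfold Spec_count_loop_iterations count_loop_iterations
  rw [cliF_fold arr [] 1, alt_eq_cliF]
  simp
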